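-- pv_equiv track=rewrite | github.com/kimhyeongjun95/AlgoPullgo | 037주차/방금그곡/hongjung.py | solution
-- ===== SOURCE A (Python) =====
-- def solution(m, musicinfos):
--     def change_note(melody):
--         if 'A#' in melody:
--             melody = melody.replace('A#', 'a')
--         if 'C#' in melody:
--             melody = melody.replace('C#', 'c')
--         if 'D#' in melody:
--             melody = melody.replace('D#', 'd')
--         if 'F#' in melody:
--             melody = melody.replace('F#', 'f')
--         if 'G#' in melody:
--             melody = melody.replace('G#', 'g')
--         return melody
--
--     m = change_note(m)
--     answer = ''
--     ans_time = 0
--     for info in musicinfos: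
--         start, end, title, melody = info.split(',')
--         start_h, start_m, end_h, end_m = map(int, start.split(':') + end.split(':'))
--         time = 60 * (end_h - start_h) + (end_m - start_m)
--         melody = change_note(melody)
--         melody_played = (melody * time)[:time]
--         if m in melody_played:
--             if time > ans_time:
--                 ans_time = time
--                 answer = title
--     if answer == '':
--         answer = '(None)'
--     return answer
-- ===== SOURCE B (Python) =====
-- def solution(m, musicinfos):
--     def tokens(s):
--         out, i = [], 0
--         while i < len(s):
--             if s[i] in 'ACDFG' and i + 1 < len(s) and s[i + 1] == '#':
--                 out.append(s[i].lower()); i += 2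
--             else:
--                 out.append(s[i]); i += 1
--         return out
--
--     def occurs(mel, tgt, time):
--         # does tgt occur in (mel * time)[:time]?  Decided on the circle of mel's
--         # tokens (occurrences are periodic mod len(mel)), never materializing the
--         # repeated melody.
--         if not tgt:
--             return True
--         L = len(mel)
--         if L == 0 or time < len(tgt):
--             return False
--         for i in range(min(L, time - len(tgt) + 1)):
--             ok = True
--             for j in range(len(tgt)):
--                 if mel[(i + j) % L] != tgt[j]:
--                     ok = False
--                     break
--             if ok:
--                 return True
--         return False
--
--     target = tokens(m)
--     answer, best = '', 0
--     for info in musicinfos: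
--         start, end, title, melody = info.split(',')
--         h1, mn1, h2, mn2 = [int(p) for p in start.split(':') + end.split(':')]
--         time = 60 * (h2 - h1) + (mn2 - mn1)
--         if occurs(tokens(melody), target, time) and time > best:
--             best, answer = time, title
--     return answer or '(None)'
-- ===== Notes on version B (the rewrite author's own statement) =====
-- stated objective: alternative
-- what changed: B tokenizes each melody once (one scan replacing A's five chained str.replace passes) and decides whether m occurs in the replayed melody by matching m on the circle of melody tokens modulo its length, instead of A's materializing (melody*time)[:time] and using Python's substring 'in'; the max-playtime selection is kept.
import Mathlib
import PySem

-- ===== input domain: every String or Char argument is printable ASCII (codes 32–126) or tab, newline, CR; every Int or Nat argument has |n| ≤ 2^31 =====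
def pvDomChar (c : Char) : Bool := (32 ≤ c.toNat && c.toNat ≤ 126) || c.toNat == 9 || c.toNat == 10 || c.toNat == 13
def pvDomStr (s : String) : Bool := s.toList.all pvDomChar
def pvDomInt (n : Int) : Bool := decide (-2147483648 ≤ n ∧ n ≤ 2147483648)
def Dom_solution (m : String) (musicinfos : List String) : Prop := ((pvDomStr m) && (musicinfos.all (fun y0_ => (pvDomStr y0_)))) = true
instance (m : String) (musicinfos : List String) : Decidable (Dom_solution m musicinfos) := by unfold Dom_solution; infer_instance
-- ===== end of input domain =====

-- B replaces A's repeat-and-truncate + substring search by a circular match: each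
-- melody is tokenized once and m is matched on the token circle modulo its length,
-- never materializing the replayed melody (alternative algorithm).

-- ===== PORT A =====

-- shared with port B: both Pythons parse each info line identically
def fields? (info : String) : Option (String × String × String × String) :=
  match PySem.Str.split? info "," with
  | some [a, b, c, d] => some (a, b, c, d)
  | _ => none

-- shared with port B: map(int, start.split(':') + end.split(':')) unpacked to 4
def times? (s e : String) : Option (Int × Int × Int × Int) :=
  match (((PySem.Str.split? s ":").getD []) ++ ((PySem.Str.split? e ":").getD [])).mapM PySem.Int.ofStr? with
  | some [a, b, c, d] => some (a, b, c, d)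
  | _ => none

def changeNoteA (melody : String) : String :=
  let melody := if PySem.Str.isIn "A#" melody then PySem.Str.replace melody "A#" "a" else melody
  let melody := if PySem.Str.isIn "C#" melody then PySem.Str.replace melody "C#" "c" else melody
  let melody := if PySem.Str.isIn "D#" melody then PySem.Str.replace melody "D#" "d" else melody
  let melody := if PySem.Str.isIn "F#" melody then PySem.Str.replace melody "F#" "f" else melody
  let melody := if PySem.Str.isIn "G#" melody then PySem.Str.replace melody "G#" "g" else melody
  melody

def stepA (m' : String) (st : String × Int) (info : String) : String × Int :=
  match fields? info with
  | none => st
  | some (start_, end_, _title, melody) =>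
    match times? start_ end_ with
    | none => st
    | some (start_h, start_m, end_h, end_m) =>
      let time : Int := 60 * (end_h - start_h) + (end_m - start_m)
      let melody' := changeNoteA melody
      let melody_played := PySem.List.slice (PySem.List.pyRepeat melody'.toList time) none (some time)
      if PySem.Chars.isIn m'.toList melody_played then
        if time > st.2 then (_title, time) else st
      else st

def solution (m : String) (musicinfos : List String) : String :=
  let m' := changeNoteA m
  let r := musicinfos.foldl (stepA m') ("", 0)
  if r.1 = "" then "(None)" else r.1

-- ===== PORT B =====

-- Source B tokens(): one scan, a sharpable letter followed by '#' becomes one lowercase token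
def tokensB : List Char → List Char
  | [] => []
  | [c] => [c]
  | c :: d :: t =>
    if (PySem.Chars.isIn [c] "ACDFG".toList ∧ d = '#') then c.toLower :: tokensB t
    else c :: tokensB (d :: t)

-- Source B occurs(): inner j-loop with break — compare tgt to the melody circle at offset i
def matchGo (mel tgt : List Char) (L i : Int) : List Int → Bool
  | [] => true
  | j :: rest =>
    if PySem.List.pyGetD mel (PySem.Int.mod (i + j) L) 'A' ≠ PySem.List.pyGetD tgt j 'A' then false
    else matchGo mel tgt L i rest

-- Source B occurs(): outer i-loop, return True on the first matching offset
def searchGo (mel tgt : List Char) (L : Int) : List Int → Bool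
  | [] => false
  | i :: rest =>
    if matchGo mel tgt L i (PySem.List.pyRange 0 (tgt.length : Int) 1) then true
    else searchGo mel tgt L rest

def occursB (mel tgt : List Char) (t : Int) : Bool :=
  if tgt = [] then true
  else if (mel.length : Int) = 0 ∨ t < (tgt.length : Int) then false
  else searchGo mel tgt (mel.length : Int)
    (PySem.List.pyRange 0 (min (mel.length : Int) (t - (tgt.length : Int) + 1)) 1)

def stepB (target : List Char) (st : String × Int) (info : String) : String × Int :=
  match fields? info with
  | none => st
  | some (start_, end_, title, melody) =>
    match times? start_ end_ with
    | none => st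
    | some (h1, mn1, h2, mn2) =>
      let time : Int := 60 * (h2 - h1) + (mn2 - mn1)
      if occursB (tokensB melody.toList) target time ∧ time > st.2 then (title, time) else st

def solution_alt (m : String) (musicinfos : List String) : String :=
  let target := tokensB m.toList
  let r := musicinfos.foldl (stepB target) ("", 0)
  if r.1 = "" then "(None)" else r.1

-- ===== PRECONDITION & SPEC =====

-- Pre_ excludes exactly the info lines on which Python A raises: not exactly 4
-- comma fields, or the colon pieces of the two times not exactly 4 int()-parsable strings.
def infoOk (info : String) : Bool :=
  match PySem.Str.split? info "," with
  | some [s, e, _, _] =>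
    match (((PySem.Str.split? s ":").getD []) ++ ((PySem.Str.split? e ":").getD [])).mapM PySem.Int.ofStr? with
    | some [_, _, _, _] => true
    | _ => false
  | _ => false

def Pre_solution (_m : String) (musicinfos : List String) : Prop :=
  ∀ info ∈ musicinfos, infoOk info = true
instance (m : String) (musicinfos : List String) : Decidable (Pre_solution m musicinfos) := by
  unfold Pre_solution; infer_instance

def pvWitness_solution : String × List String := ("ABC", ["12:00,12:14,HELLO,ABCDEFG"])

def Spec_solution (m : String) (musicinfos : List String) (out : String) : Prop := out = solution_alt m musicinfos
instance (m : String) (musicinfos : List String) (out : String) : Decidable (Spec_solution m musicinfos out) := by unfold Spec_solution; infer_instance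

-- ===== CLAIM (what is proved, stated in full; the proofs are below) =====
def Claim_equal_solution : Prop := ∀ (m : String) (musicinfos : List String), Dom_solution m musicinfos → Pre_solution m musicinfos → Spec_solution m musicinfos (solution m musicinfos)

-- ===== LEMMAS AND PROOFS =====

-- one str.replace of the pattern [X,'#'] by [x], as simple structural recursion
def rep (X x : Char) : List Char → List Char
  | [] => []
  | c :: t => if [X, '#'].isPrefixOf (c :: t) then x :: rep X x t.tail else c :: rep X x t
  termination_by l => l.length
  decreasing_by
  · exact Nat.lt_succ_of_le (by simp)
  · simp

theorem prefix2_iff (X c : Char) (t : List Char) :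
    [X, '#'].isPrefixOf (c :: t) = true ↔ (c = X ∧ t.head? = some '#') := by
  cases t with
  | nil => simp [List.isPrefixOf]
  | cons d t' =>
    simp only [List.isPrefixOf, Bool.and_eq_true, beq_iff_eq, List.head?_cons, Option.some.injEq]
    constructor
    · rintro ⟨h1, h2, -⟩; exact ⟨h1.symm, h2.symm⟩
    · rintro ⟨h1, h2⟩; exact ⟨h1.symm, h2.symm, trivial⟩

theorem rep_pass (X x c : Char) (t : List Char) (h : ¬(c = X ∧ t.head? = some '#')) :
    rep X x (c :: t) = c :: rep X x t := by
  rw [rep, if_neg]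
  intro hp; exact h ((prefix2_iff X c t).1 hp)

theorem rep_match (X x : Char) (t : List Char) :
    rep X x (X :: '#' :: t) = x :: rep X x t := by
  rw [rep, if_pos]
  · rfl
  · simp [List.isPrefixOf]

theorem rep_head (X x : Char) (hx : x ≠ '#') :
    ∀ l : List Char, l.head? ≠ some '#' → (rep X x l).head? ≠ some '#' := by
  intro l hl
  cases l with
  | nil => simp [rep]
  | cons c t =>
    by_cases h : c = X ∧ t.head? = some '#'
    · obtain ⟨h1, h2⟩ := h
      cases t with
      | nil => simp at h2
      | cons d t' =>
        simp only [List.head?_cons, Option.some.injEq] at h2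
        subst h1 h2
        rw [rep_match]; simpa
    · rw [rep_pass _ _ _ _ h]; simpa using hl

theorem go_spec (X x : Char) :
    ∀ (fuel : Nat) (l acc : List Char), l.length ≤ fuel →
      PySem.Chars.replace.go [X, '#'] [x] fuel l acc = acc.reverse ++ rep X x l := by
  intro fuel
  induction fuel with
  | zero =>
    intro l acc hl
    have : l = [] := List.eq_nil_of_length_eq_zero (Nat.le_zero.1 hl)
    subst this
    rw [PySem.Chars.replace.go]; simp [rep]
  | succ f ih =>
    intro l acc hl
    cases l with
    | nil =>
      rw [PySem.Chars.replace.go]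
      · simp [rep]
      · omega
    | cons c t =>
      rw [PySem.Chars.replace.go]
      by_cases hp : [X, '#'].isPrefixOf (c :: t) = true
      · rw [if_pos hp]
        obtain ⟨hc, hh⟩ := (prefix2_iff X c t).1 hp
        cases t with
        | nil => simp at hh
        | cons d t' =>
          simp only [List.head?_cons, Option.some.injEq] at hh
          subst hh
          rw [hc, rep_match]
          have ht' : t'.length ≤ f := by simp at hl; omega
          rw [show List.drop ([X, '#'].length) (X :: '#' :: t') = t' from rfl]
          rw [ih t' ([x].reverse ++ acc) ht']
          simp
      · rw [if_neg hp]
        have hnp : ¬(c = X ∧ t.head? = some '#') := fun h => hp ((prefix2_iff X c t).2 h)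
        rw [rep_pass X x c t hnp]
        have ht : t.length ≤ f := by simp at hl; omega
        rw [ih t (c :: acc) ht]
        simp

theorem replace_eq_rep (X x : Char) (s : List Char) :
    PySem.Chars.replace s [X, '#'] [x] = rep X x s := by
  rw [PySem.Chars.replace]
  simpa using go_spec X x s.length s [] le_rfl

theorem rep_of_not_infix (X x : Char) :
    ∀ s : List Char, ¬ ([X, '#'] <:+: s) → rep X x s = s := by
  intro s
  induction s with
  | nil => intro _; simp [rep]
  | cons c t ih =>
    intro h
    have hnp : ¬(c = X ∧ t.head? = some '#') := by
      rintro ⟨hc, hh⟩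
      apply h
      cases t with
      | nil => simp at hh
      | cons d t' =>
        simp only [List.head?_cons, Option.some.injEq] at hh
        exact ⟨[], t', by simp [hc, hh]⟩
    rw [rep_pass X x c t hnp, ih (fun hi => h (List.infix_cons hi))]

theorem change_step (X x : Char) (old new : String) (hold : old.toList = [X, '#'])
    (hnew : new.toList = [x]) (s : String) :
    (if PySem.Str.isIn old s then PySem.Str.replace s old new else s).toList = rep X x s.toList := by
  by_cases h : PySem.Str.isIn old s = true
  · rw [if_pos h]
    rw [PySem.Str.toList_replace, hold, hnew, replace_eq_rep]
  · rw [if_neg h]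
    have hni : ¬ (old.toList <:+: s.toList) := by
      rw [← PySem.Str.isIn_iff_infix]; exact h
    rw [hold] at hni
    exact (rep_of_not_infix X x s.toList hni).symm

def chain (l : List Char) : List Char :=
  rep 'G' 'g' (rep 'F' 'f' (rep 'D' 'd' (rep 'C' 'c' (rep 'A' 'a' l))))

theorem changeA_eq_chain (s : String) : (changeNoteA s).toList = chain s.toList := by
  unfold changeNoteA chain
  rw [change_step 'G' 'g' "G#" "g" (by decide) (by decide),
      change_step 'F' 'f' "F#" "f" (by decide) (by decide),
      change_step 'D' 'd' "D#" "d" (by decide) (by decide),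
      change_step 'C' 'c' "C#" "c" (by decide) (by decide),
      change_step 'A' 'a' "A#" "a" (by decide) (by decide)]

theorem rep_nil (X x : Char) : rep X x [] = [] := by simp [rep]

theorem rep_single (X x c : Char) : rep X x [c] = [c] := by
  rw [rep_pass X x c [] (by rintro ⟨-, h⟩; simp at h), rep_nil]

theorem singleton_infix_iff (c : Char) (l : List Char) : [c] <:+: l ↔ c ∈ l := by
  constructor
  · intro h; exact h.subset (by simp)
  · intro h
    obtain ⟨s, t, rfl⟩ := List.append_of_mem h
    exact ⟨s, t, by simp⟩

theorem sharp5 (c : Char) :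
    PySem.Chars.isIn [c] "ACDFG".toList = true ↔
      (c = 'A' ∨ c = 'C' ∨ c = 'D' ∨ c = 'F' ∨ c = 'G') := by
  rw [PySem.Chars.isIn_iff_infix, singleton_infix_iff]
  simp [show "ACDFG".toList = ['A', 'C', 'D', 'F', 'G'] from rfl]

theorem chain_pass (c d : Char) (t : List Char)
    (h : ¬((c = 'A' ∨ c = 'C' ∨ c = 'D' ∨ c = 'F' ∨ c = 'G') ∧ d = '#')) :
    chain (c :: d :: t) = c :: chain (d :: t) := by
  unfold chain
  have hsharp : (c = 'A' ∨ c = 'C' ∨ c = 'D' ∨ c = 'F' ∨ c = 'G') → d ≠ '#' :=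
    fun hs hd => h ⟨hs, hd⟩
  have hA : rep 'A' 'a' (c :: d :: t) = c :: rep 'A' 'a' (d :: t) := by
    apply rep_pass
    rintro ⟨hc, hh⟩
    simp only [List.head?_cons, Option.some.injEq] at hh
    exact hsharp (Or.inl hc) hh
  rw [hA]
  by_cases hd : d = '#'
  · have hc : ¬(c = 'A' ∨ c = 'C' ∨ c = 'D' ∨ c = 'F' ∨ c = 'G') := fun hs => h ⟨hs, hd⟩
    rw [rep_pass 'C' 'c' c _ (fun hx => hc (Or.inr (Or.inl hx.1))),
        rep_pass 'D' 'd' c _ (fun hx => hc (Or.inr (Or.inr (Or.inl hx.1)))),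
        rep_pass 'F' 'f' c _ (fun hx => hc (Or.inr (Or.inr (Or.inr (Or.inl hx.1))))),
        rep_pass 'G' 'g' c _ (fun hx => hc (Or.inr (Or.inr (Or.inr (Or.inr hx.1)))))]
  · have h0 : (d :: t).head? ≠ some '#' := by simpa using hd
    have h1 := rep_head 'A' 'a' (by decide) _ h0
    have h2 := rep_head 'C' 'c' (by decide) _ h1
    have h3 := rep_head 'D' 'd' (by decide) _ h2
    have h4 := rep_head 'F' 'f' (by decide) _ h3
    rw [rep_pass 'C' 'c' c _ (fun hx => h1 hx.2),
        rep_pass 'D' 'd' c _ (fun hx => h2 hx.2),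
        rep_pass 'F' 'f' c _ (fun hx => h3 hx.2),
        rep_pass 'G' 'g' c _ (fun hx => h4 hx.2)]

theorem pass_ne (X x c : Char) (l : List Char) (h : c ≠ X) :
    rep X x (c :: l) = c :: rep X x l :=
  rep_pass X x c l (fun hx => h hx.1)

theorem chain_A (t : List Char) : chain ('A' :: '#' :: t) = 'a' :: chain t := by
  unfold chain
  rw [rep_match 'A' 'a' t,
      pass_ne 'C' 'c' 'a' _ (by decide), pass_ne 'D' 'd' 'a' _ (by decide),
      pass_ne 'F' 'f' 'a' _ (by decide), pass_ne 'G' 'g' 'a' _ (by decide)]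

theorem chain_C (t : List Char) : chain ('C' :: '#' :: t) = 'c' :: chain t := by
  unfold chain
  rw [pass_ne 'A' 'a' 'C' _ (by decide), pass_ne 'A' 'a' '#' _ (by decide),
      rep_match 'C' 'c' _,
      pass_ne 'D' 'd' 'c' _ (by decide), pass_ne 'F' 'f' 'c' _ (by decide),
      pass_ne 'G' 'g' 'c' _ (by decide)]

theorem chain_D (t : List Char) : chain ('D' :: '#' :: t) = 'd' :: chain t := by
  unfold chain
  rw [pass_ne 'A' 'a' 'D' _ (by decide), pass_ne 'A' 'a' '#' _ (by decide),
      pass_ne 'C' 'c' 'D' _ (by decide), pass_ne 'C' 'c' '#' _ (by decide),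
      rep_match 'D' 'd' _,
      pass_ne 'F' 'f' 'd' _ (by decide), pass_ne 'G' 'g' 'd' _ (by decide)]

theorem chain_F (t : List Char) : chain ('F' :: '#' :: t) = 'f' :: chain t := by
  unfold chain
  rw [pass_ne 'A' 'a' 'F' _ (by decide), pass_ne 'A' 'a' '#' _ (by decide),
      pass_ne 'C' 'c' 'F' _ (by decide), pass_ne 'C' 'c' '#' _ (by decide),
      pass_ne 'D' 'd' 'F' _ (by decide), pass_ne 'D' 'd' '#' _ (by decide),
      rep_match 'F' 'f' _,
      pass_ne 'G' 'g' 'f' _ (by decide)]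

theorem chain_G (t : List Char) : chain ('G' :: '#' :: t) = 'g' :: chain t := by
  unfold chain
  rw [pass_ne 'A' 'a' 'G' _ (by decide), pass_ne 'A' 'a' '#' _ (by decide),
      pass_ne 'C' 'c' 'G' _ (by decide), pass_ne 'C' 'c' '#' _ (by decide),
      pass_ne 'D' 'd' 'G' _ (by decide), pass_ne 'D' 'd' '#' _ (by decide),
      pass_ne 'F' 'f' 'G' _ (by decide), pass_ne 'F' 'f' '#' _ (by decide),
      rep_match 'G' 'g' _]

theorem chain_eq_tokensB : ∀ l : List Char, chain l = tokensB l := by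
  intro l
  induction l using tokensB.induct with
  | case1 => simp [chain, rep_nil, tokensB]
  | case2 c => simp [chain, rep_single, tokensB]
  | case3 c d t hcond ih =>
    obtain ⟨hin, hd⟩ := hcond
    subst hd
    rw [tokensB, if_pos ⟨hin, rfl⟩]
    rcases (sharp5 c).1 hin with h | h | h | h | h <;> subst h
    · rw [chain_A, ih]; rfl
    · rw [chain_C, ih]; rfl
    · rw [chain_D, ih]; rfl
    · rw [chain_F, ih]; rfl
    · rw [chain_G, ih]; rfl
  | case4 c d t hcond ih =>
    rw [tokensB, if_neg hcond]
    rw [chain_pass c d t (fun hx => hcond ⟨(sharp5 c).2 hx.1, hx.2⟩), ih]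

theorem notes_eq (s : String) : (changeNoteA s).toList = tokensB s.toList := by
  rw [changeA_eq_chain, chain_eq_tokensB]

-- ===== the circular-match correctness =====

theorem flat_get? (mel : List Char) (hL : 0 < mel.length) :
    ∀ (n p : Nat), p < n * mel.length →
      ((List.replicate n mel).flatten)[p]? = mel[p % mel.length]? := by
  intro n
  induction n with
  | zero => intro p hp; omega
  | succ k ih =>
    intro p hp
    rw [List.replicate_succ, List.flatten_cons]
    by_cases h : p < mel.length
    · rw [List.getElem?_append_left h, Nat.mod_eq_of_lt h]
    · rw [Nat.not_lt] at h
      rw [List.getElem?_append_right h, ih (p - mel.length) (by rw [Nat.succ_mul] at hp; omega),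
          Nat.mod_eq_sub_mod h]

theorem slice_nil (a b : Option Int) : PySem.List.slice ([] : List Char) a b = [] := by
  apply List.eq_nil_iff_forall_not_mem.2
  intro x hx
  exact absurd (PySem.List.mem_of_mem_slice [] a b hx) (List.not_mem_nil)

theorem pyRepeat_nonpos (mel : List Char) (t : Int) (ht : t ≤ 0) :
    PySem.List.pyRepeat mel t = [] := by
  have : t.toNat = 0 := by omega
  simp [PySem.List.pyRepeat, this]

theorem played_eq (mel : List Char) (t : Int) (ht : 0 ≤ t) :
    PySem.List.slice (PySem.List.pyRepeat mel t) none (some t)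
      = ((List.replicate t.toNat mel).flatten).take t.toNat := by
  rw [PySem.List.slice_to _ ht]; rfl

theorem played_get? (mel : List Char) (hL : 0 < mel.length) (t : Int) (ht : 0 ≤ t)
    (p : Nat) (hp : p < t.toNat) :
    (PySem.List.slice (PySem.List.pyRepeat mel t) none (some t))[p]? = mel[p % mel.length]? := by
  rw [played_eq mel t ht, List.getElem?_take, if_pos hp,
      flat_get? mel hL t.toNat p (lt_of_lt_of_le hp (Nat.le_mul_of_pos_right _ hL))]

theorem played_length_le (mel : List Char) (t : Int) :
    (PySem.List.slice (PySem.List.pyRepeat mel t) none (some t)).length ≤ t.toNat := by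
  by_cases ht : 0 ≤ t
  · rw [played_eq mel t ht]
    simp
  · rw [pyRepeat_nonpos mel t (by omega), slice_nil]
    simp

theorem played_length (mel : List Char) (hL : 0 < mel.length) (t : Int) (ht : 0 ≤ t) :
    (PySem.List.slice (PySem.List.pyRepeat mel t) none (some t)).length = t.toNat := by
  rw [played_eq mel t ht, List.length_take, List.length_flatten]
  simp [Nat.min_eq_left (Nat.le_mul_of_pos_right _ hL)]

theorem matchGo_true_iff (mel tgt : List Char) (L i : Int) :
    ∀ js : List Int, matchGo mel tgt L i js = true ↔
      ∀ j ∈ js, PySem.List.pyGetD mel (PySem.Int.mod (i + j) L) 'A' = PySem.List.pyGetD tgt j 'A' := by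
  intro js
  induction js with
  | nil => simp [matchGo]
  | cons j rest ih =>
    rw [matchGo]
    by_cases h : PySem.List.pyGetD mel (PySem.Int.mod (i + j) L) 'A' = PySem.List.pyGetD tgt j 'A'
    · rw [if_neg (by simpa using h), ih]
      constructor
      · intro hall j' hj'
        rcases List.mem_cons.1 hj' with rfl | hj'
        · exact h
        · exact hall j' hj'
      · intro hall j' hj'; exact hall j' (List.mem_cons_of_mem _ hj')
    · rw [if_pos (by simpa using h)]
      constructor
      · intro hfalse; exact absurd hfalse (by simp)
      · intro hall; exact absurd (hall j (List.mem_cons_self)) h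

theorem searchGo_true_iff (mel tgt : List Char) (L : Int) :
    ∀ is : List Int, searchGo mel tgt L is = true ↔
      ∃ i ∈ is, matchGo mel tgt L i (PySem.List.pyRange 0 (tgt.length : Int) 1) = true := by
  intro is
  induction is with
  | nil => simp [searchGo]
  | cons i rest ih =>
    rw [searchGo]
    by_cases h : matchGo mel tgt L i (PySem.List.pyRange 0 (tgt.length : Int) 1) = true
    · simp [h]
    · rw [if_neg h, ih]
      constructor
      · rintro ⟨j, hj, hs⟩; exact ⟨j, List.mem_cons_of_mem i hj, hs⟩
      · rintro ⟨j, hj, hs⟩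
        rcases List.mem_cons.1 hj with rfl | hj'
        · exact absurd hs h
        · exact ⟨j, hj', hs⟩

theorem pymod_natCast (a b : Nat) (hb : 0 < b) :
    PySem.Int.mod ((a : Int)) ((b : Int)) = ((a % b : Nat) : Int) := by
  rw [PySem.Int.mod, Int.fmod_eq_emod, if_pos (Or.inl (by positivity)), add_zero]
  exact (Int.natCast_mod a b).symm

theorem pyGetD_nat (l : List Char) (n : Nat) (h : n < l.length) :
    PySem.List.pyGetD l (n : Int) 'A' = l[n] := by
  rw [PySem.List.pyGetD_natCast, List.getD_eq_getElem?_getD, List.getElem?_eq_getElem h]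
  rfl

-- B's inner check at offset iN ↔ pointwise match on the melody circle
theorem matchAll_iff (mel tgt : List Char) (hL : 0 < mel.length) (iN : Nat) :
    (∀ j ∈ PySem.List.pyRange 0 (tgt.length : Int) 1,
        PySem.List.pyGetD mel (PySem.Int.mod ((iN : Int) + j) (mel.length : Int)) 'A'
          = PySem.List.pyGetD tgt j 'A')
    ↔ ∀ jN : Nat, jN < tgt.length → mel[(iN + jN) % mel.length]? = tgt[jN]? := by
  constructor
  · intro hall jN hj
    have hmem : ((jN : Int)) ∈ PySem.List.pyRange 0 (tgt.length : Int) 1 := by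
      rw [PySem.List.mem_pyRange_one]; constructor <;> [positivity; exact_mod_cast hj]
    have := hall (jN : Int) hmem
    rw [show ((iN : Int) + (jN : Int)) = (((iN + jN : Nat) : Int)) by push_cast; ring,
        pymod_natCast _ _ hL, pyGetD_nat mel _ (Nat.mod_lt _ hL), pyGetD_nat tgt _ hj] at this
    rw [List.getElem?_eq_getElem (Nat.mod_lt _ hL), List.getElem?_eq_getElem hj, this]
  · intro hall j hj
    rw [PySem.List.mem_pyRange_one] at hj
    obtain ⟨hj0, hjlt⟩ := hj
    have hjN : j.toNat < tgt.length := by omega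
    have hj' : j = ((j.toNat : Nat) : Int) := by omega
    rw [hj', show ((iN : Int) + ((j.toNat : Nat) : Int)) = (((iN + j.toNat : Nat) : Int)) by push_cast; ring,
        pymod_natCast _ _ hL, pyGetD_nat mel _ (Nat.mod_lt _ hL), pyGetD_nat tgt _ hjN]
    have := hall j.toNat hjN
    rw [List.getElem?_eq_getElem (Nat.mod_lt _ hL), List.getElem?_eq_getElem hjN] at this
    exact Option.some.inj this

-- occurrence of tgt in the truncated repetition ↔ a circular match at some offset
theorem occ_iff (mel tgt : List Char) (hL : 0 < mel.length) (htgt : tgt ≠ []) (t : Int)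
    (ht : (tgt.length : Int) ≤ t) :
    (∃ iN : Nat, (iN : Int) < min (mel.length : Int) (t - (tgt.length : Int) + 1) ∧
        ∀ jN : Nat, jN < tgt.length → mel[(iN + jN) % mel.length]? = tgt[jN]?)
    ↔ ∃ k : Nat, tgt <+: List.drop k (PySem.List.slice (PySem.List.pyRepeat mel t) none (some t)) := by
  have ht0 : 0 ≤ t := le_trans (by positivity) ht
  set played := PySem.List.slice (PySem.List.pyRepeat mel t) none (some t) with hplayed
  have hlen : played.length = t.toNat := played_length mel hL t ht0
  constructor
  · rintro ⟨iN, hibound, hmatch⟩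
    have hfit : iN + tgt.length ≤ t.toNat := by omega
    refine ⟨iN, List.prefix_iff_eq_take.2 ?_⟩
    apply List.ext_getElem?
    intro q
    rw [List.getElem?_take, List.getElem?_drop]
    by_cases hq : q < tgt.length
    · rw [if_pos hq, played_get? mel hL t ht0 (iN + q) (by omega), ← hmatch q hq]
    · rw [if_neg hq, List.getElem?_eq_none (by omega)]
  · rintro ⟨k, hpre⟩
    have hklen : tgt.length ≤ played.length - k := by
      have := hpre.length_le
      rwa [List.length_drop] at this
    have hk : k + tgt.length ≤ t.toNat := by
      have : 0 < tgt.length := List.length_pos_iff.2 htgt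
      omega
    refine ⟨k % mel.length, ?_, ?_⟩
    · have h1 : k % mel.length < mel.length := Nat.mod_lt _ hL
      have h2 : k % mel.length ≤ k := Nat.mod_le _ _
      omega
    · intro jN hj
      have htake := List.prefix_iff_eq_take.1 hpre
      have : tgt[jN]? = played[k + jN]? := by
        conv_lhs => rw [htake]
        rw [List.getElem?_take, if_pos hj, List.getElem?_drop]
      rw [this, played_get? mel hL t ht0 (k + jN) (by omega)]
      congr 1
      conv_lhs => rw [Nat.add_mod, Nat.mod_mod_of_dvd _ dvd_rfl]
      conv_rhs => rw [Nat.add_mod]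

theorem isIn_nil_left (s : List Char) : PySem.Chars.isIn [] s = true :=
  (PySem.Chars.exists_prefix_drop_iff_isIn [] s).1 ⟨0, List.nil_prefix⟩

theorem occursB_eq (mel tgt : List Char) (t : Int) :
    occursB mel tgt t
      = PySem.Chars.isIn tgt (PySem.List.slice (PySem.List.pyRepeat mel t) none (some t)) := by
  by_cases htgt : tgt = []
  · subst htgt
    rw [occursB, if_pos rfl, isIn_nil_left]
  rw [occursB, if_neg htgt]
  by_cases hmel : mel = []
  · subst hmel
    have hrep : PySem.List.pyRepeat ([] : List Char) t = [] := by simp [PySem.List.pyRepeat]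
    rw [if_pos (Or.inl (by simp)), hrep, slice_nil]
    symm
    rw [Bool.eq_false_iff]
    intro hin
    exact htgt (List.eq_nil_of_infix_nil ((PySem.Chars.isIn_iff_infix _ _).1 hin))
  by_cases ht : t < (tgt.length : Int)
  · rw [if_pos (Or.inr ht)]
    symm
    rw [Bool.eq_false_iff]
    intro hin
    have hinf := (PySem.Chars.isIn_iff_infix _ _).1 hin
    have hle := hinf.length_le
    have := played_length_le mel t
    have htp : 0 < tgt.length := List.length_pos_iff.2 htgt
    omega
  rw [not_lt] at ht
  have hL : 0 < mel.length := List.length_pos_iff.2 hmel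
  rw [if_neg (by rw [not_or]; exact ⟨Nat.cast_ne_zero.2 hL.ne', not_lt.2 ht⟩)]
  rw [Bool.eq_iff_iff, searchGo_true_iff, ← PySem.Chars.exists_prefix_drop_iff_isIn,
      ← occ_iff mel tgt hL htgt t ht]
  constructor
  · rintro ⟨i, hi, hm⟩
    rw [PySem.List.mem_pyRange_one] at hi
    obtain ⟨hi0, hilt⟩ := hi
    refine ⟨i.toNat, by omega, ?_⟩
    rw [← matchAll_iff mel tgt hL i.toNat]
    intro j hj
    have := (matchGo_true_iff mel tgt (mel.length : Int) i _).1 hm j hj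
    rwa [show ((i.toNat : Nat) : Int) = i by omega]
  · rintro ⟨iN, hibound, hmatch⟩
    refine ⟨(iN : Int), ?_, ?_⟩
    · rw [PySem.List.mem_pyRange_one]
      exact ⟨by positivity, hibound⟩
    · rw [matchGo_true_iff]
      exact (matchAll_iff mel tgt hL iN).2 hmatch

theorem step_eq (m' : String) (target : List Char) (hm : m'.toList = target)
    (st : String × Int) (info : String) : stepA m' st info = stepB target st info := by
  rw [stepA, stepB]
  split
  next => rfl
  next start_ end_ title melody _ =>
    split
    next => rfl
    next sh sm eh em _ =>
      simp only [notes_eq melody, hm, ← occursB_eq]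
      split_ifs <;> tauto

-- ===== VERDICT (by name: the statement is the Claim_ definition above) =====
theorem solution_spec : Claim_equal_solution := by
  intro m musicinfos _ _
  unfold Spec_solution solution solution_alt
  show (if (musicinfos.foldl (stepA (changeNoteA m)) ("", 0)).1 = "" then "(None)"
        else (musicinfos.foldl (stepA (changeNoteA m)) ("", 0)).1) =
       (if (musicinfos.foldl (stepB (tokensB m.toList)) ("", 0)).1 = "" then "(None)"
        else (musicinfos.foldl (stepB (tokensB m.toList)) ("", 0)).1)
  rw [show stepA (changeNoteA m) = stepB (tokensB m.toList) from
    funext fun st => funext fun info => step_eq _ _ (notes_eq m) st info]
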